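-- pv_equiv track=rewrite | github.com/TheNitromeFan/baekjoon | 16654.py | valid_quote
-- ===== SOURCE A (Python) =====
-- def valid_quote(quote):
--     if quote.count("<<") != quote.count(">>"):
--         return "Keine Loesung"
--     stack = []
--     ret = ""
--     for i in range(0, len(quote), 2):
--         if stack and quote[i] != quote[stack[0]]:
--             ret += "]"
--             stack.pop()
--         else:
--             ret += "["
--             stack.append(i)
--     if stack:
--         return "Keine Loesung"
--     else:
--         return ret
-- ===== SOURCE B (Python) =====
-- def valid_quote(quote):
--     if quote.count("<<") != quote.count(">>"):
--         return "Keine Loesung"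
--     seq = quote[::2]
--     # stage 1: run-length encode the quote characters
--     runs = []
--     i = 0
--     n = len(seq)
--     while i < n:
--         j = i
--         while j < n and seq[j] == seq[i]:
--             j += 1
--         runs.append((seq[i], j - i))
--         i = j
--     # stage 2: process whole runs in bulk against a (depth, base) state
--     depth = 0
--     base = ""
--     parts = []
--     for c, m in runs:
--         if depth == 0:
--             base = c
--             parts.append("[" * m)
--             depth = m
--         elif c == base:
--             parts.append("[" * m)
--             depth += m
--         else:
--             k = min(m, depth)
--             parts.append("]" * k)
--             depth -= k
--             r = m - k
--             if r:
--                 base = c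
--                 parts.append("[" * r)
--                 depth = r
--     return "Keine Loesung" if depth else "".join(parts)
-- ===== Notes on version B (the rewrite author's own statement) =====
-- stated objective: alternative
-- what changed: Replaced the single char-by-char stack loop by two staged passes: run-length encode the characters at even indices, then process each maximal run in bulk (whole-run pushes, min(run,depth) pops and a possible re-open) on a (depth, base) state, emitting bracket blocks with string repetition instead of per-character appends.
import Mathlib
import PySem

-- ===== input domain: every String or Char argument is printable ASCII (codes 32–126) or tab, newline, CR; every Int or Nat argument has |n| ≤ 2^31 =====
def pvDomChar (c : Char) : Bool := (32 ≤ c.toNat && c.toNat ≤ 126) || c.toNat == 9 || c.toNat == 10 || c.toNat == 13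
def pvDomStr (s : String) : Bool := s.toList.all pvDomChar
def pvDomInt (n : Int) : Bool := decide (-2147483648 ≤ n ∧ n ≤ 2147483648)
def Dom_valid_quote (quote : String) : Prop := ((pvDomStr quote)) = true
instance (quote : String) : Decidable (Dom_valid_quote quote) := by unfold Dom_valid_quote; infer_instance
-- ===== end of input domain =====

-- B re-implements the char-by-char stack loop as two staged passes: run-length encode the
-- characters at even indices, then process whole runs in bulk (objective: alternative).

-- ===== PORT A =====
-- loop body of A: push i, or pop, comparing quote[i] with quote[stack[0]]
def vqStepA (quote : String) (st : List Int × String) (i : Int) : List Int × String :=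
  let stack := st.1
  let ret := st.2
  if stack ≠ [] ∧ PySem.Str.pyGet? quote i ≠ stack.head?.bind (fun j => PySem.Str.pyGet? quote j) then
    (stack.dropLast, ret ++ "]")
  else
    (stack ++ [i], ret ++ "[")

def valid_quote (quote : String) : String :=
  if PySem.Str.count quote "<<" ≠ PySem.Str.count quote ">>" then "Keine Loesung"
  else
    let st := (PySem.List.pyRange 0 (PySem.Str.len quote) 2).foldl (vqStepA quote) ([], "")
    if st.1 ≠ [] then "Keine Loesung" else st.2

-- ===== PORT B =====
-- inner while loop of B's stage 1: length of the leading run of c, and the rest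
def vqRun (c : Char) : List Char → Nat × List Char
  | [] => (0, [])
  | d :: rest => if d = c then ((vqRun c rest).1 + 1, (vqRun c rest).2) else (0, d :: rest)

-- termination measure for vqRle (the port needs it in decreasing_by)
theorem vqRun_len (c : Char) : ∀ l : List Char, (vqRun c l).2.length ≤ l.length := by
  intro l
  induction l with
  | nil => simp [vqRun]
  | cons d rest ih =>
    by_cases h : d = c <;> simp [vqRun, h]
    omega

-- outer while loop of B's stage 1: run-length encoding
def vqRle : List Char → List (Char × Nat)
  | [] => []
  | c :: rest => (c, (vqRun c rest).1 + 1) :: vqRle (vqRun c rest).2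
termination_by l => l.length
decreasing_by
  simp only [List.length_cons]
  exact Nat.lt_succ_of_le (vqRun_len _ _)

-- loop body of B's stage 2: process a whole run against the (depth, base) state
def vqStepRun (st : Int × Char × List String) (run : Char × Nat) : Int × Char × List String :=
  let depth := st.1
  let base := st.2.1
  let parts := st.2.2
  let c := run.1
  let m := run.2
  if depth = 0 then ((m : Int), c, parts ++ [String.ofList (List.replicate m '[')])
  else if c = base then (depth + (m : Int), base, parts ++ [String.ofList (List.replicate m '[')])
  else
    let k := min (m : Int) depth
    let r := (m : Int) - k
    if r ≠ 0 then
      (r, c, parts ++ [String.ofList (List.replicate k.toNat ']'), String.ofList (List.replicate r.toNat '[')])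
    else (depth - k, base, parts ++ [String.ofList (List.replicate k.toNat ']')])

def valid_quote_alt (quote : String) : String :=
  if PySem.Str.count quote "<<" ≠ PySem.Str.count quote ">>" then "Keine Loesung"
  else
    let seq := ((PySem.Str.slice? quote none none 2).getD "").toList
    let st := (vqRle seq).foldl vqStepRun (0, ' ', [])
    if st.1 ≠ 0 then "Keine Loesung" else String.join st.2.2

-- ===== PRECONDITION & SPEC =====
def Spec_valid_quote (quote : String) (out : String) : Prop := out = valid_quote_alt quote
instance (quote : String) (out : String) : Decidable (Spec_valid_quote quote out) := by unfold Spec_valid_quote; infer_instance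

-- ===== CLAIM (what is proved, stated in full; the proofs are below) =====
def Claim_equal_valid_quote : Prop := ∀ (quote : String), Dom_valid_quote quote → Spec_valid_quote quote (valid_quote quote)

-- ===== LEMMAS AND PROOFS =====

-- proof-internal: the characters at even indices
def everySecond : List Char → List Char
  | [] => []
  | [a] => [a]
  | a :: _ :: t => a :: everySecond t

-- proof-internal: depth/base reformulation of A's stack loop, per index
def vqStepB (quote : String) (st : Int × Option Char × String) (i : Int) : Int × Option Char × String :=
  let depth := st.1
  let base := st.2.1
  let ret := st.2.2
  let c := PySem.Str.pyGet? quote i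
  if depth > 0 ∧ c ≠ base then
    (depth - 1, base, ret ++ "]")
  else
    (depth + 1, if depth = 0 then c else base, ret ++ "[")

-- proof-internal: the same loop per character
def vqStepChar (st : Int × Char × String) (c : Char) : Int × Char × String :=
  if 0 < st.1 ∧ c ≠ st.2.1 then (st.1 - 1, st.2.1, st.2.2 ++ "]")
  else (st.1 + 1, if st.1 = 0 then c else st.2.1, st.2.2 ++ "[")

-- A's fold versus the depth/base index fold
theorem vq_loop (quote : String) : ∀ (l : List Int) (stack : List Int) (ret : String)
    (depth : Int) (base : Option Char),
    depth = (stack.length : Int) →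
    (stack ≠ [] → base = stack.head?.bind (fun j => PySem.Str.pyGet? quote j)) →
    (l.foldl (vqStepB quote) (depth, base, ret)).1
      = ((l.foldl (vqStepA quote) (stack, ret)).1.length : Int)
    ∧ (l.foldl (vqStepB quote) (depth, base, ret)).2.2
      = (l.foldl (vqStepA quote) (stack, ret)).2 := by
  intro l
  induction l with
  | nil => intro stack ret depth base hd hb; simp [hd]
  | cons i rest ih =>
    intro stack ret depth base hd hb
    simp only [List.foldl_cons]
    match stack with
    | [] =>
      have hd0 : depth = 0 := by simpa using hd
      have hA : vqStepA quote ([], ret) i = ([i], ret ++ "[") := by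
        simp [vqStepA]
      have hB : vqStepB quote (depth, base, ret) i
          = (1, PySem.Str.pyGet? quote i, ret ++ "[") := by
        simp [vqStepB, hd0]
      rw [hA, hB]
      exact ih [i] (ret ++ "[") 1 (PySem.Str.pyGet? quote i) (by simp) (by simp)
    | j :: s =>
      have hbj : base = PySem.Str.pyGet? quote j := by simpa [List.head?] using hb (by simp)
      have hdpos : depth > 0 := by rw [hd]; exact_mod_cast Nat.succ_pos s.length
      by_cases hc : PySem.List.pyGet? quote.toList i = PySem.List.pyGet? quote.toList j
      · -- both sides push
        have hA : vqStepA quote (j :: s, ret) i = (j :: s ++ [i], ret ++ "[") := by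
          simp [vqStepA, List.head?, hc]
        have hB : vqStepB quote (depth, base, ret) i = (depth + 1, base, ret ++ "[") := by
          have : ¬ depth = 0 := by omega
          simp [vqStepB, hbj, hc, this]
        rw [hA, hB]
        refine ih (j :: s ++ [i]) (ret ++ "[") (depth + 1) base
          ?_ (by simp [List.head?, hbj])
        simp only [List.cons_append, List.length_cons, List.length_append,
          List.length_nil, hd]
        push_cast; ring
      · -- both sides pop
        have hA : vqStepA quote (j :: s, ret) i = ((j :: s).dropLast, ret ++ "]") := by
          simp [vqStepA, List.head?, hc]
        have hB : vqStepB quote (depth, base, ret) i = (depth - 1, base, ret ++ "]") := by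
          simp [vqStepB, hbj, hc, hdpos]
        rw [hA, hB]
        refine ih (j :: s).dropLast (ret ++ "]") (depth - 1) base ?_ ?_
        · rw [hd]
          simp only [List.length_dropLast, List.length_cons]
          omega
        · intro hne
          match s with
          | [] => simp at hne
          | k :: s' => simpa [List.head?] using hbj

-- the index fold versus the character fold, when the indices map to exactly those characters
theorem vq_foldBC (quote : String) : ∀ (l : List Int) (cs : List Char),
    l.map (fun i => PySem.Str.pyGet? quote i) = cs.map some →
    ∀ (d : Int) (bo : Option Char) (b : Char) (ret : String), 0 ≤ d → (0 < d → bo = some b) →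
    (l.foldl (vqStepB quote) (d, bo, ret)).1 = (cs.foldl vqStepChar (d, b, ret)).1
    ∧ (l.foldl (vqStepB quote) (d, bo, ret)).2.2 = (cs.foldl vqStepChar (d, b, ret)).2.2 := by
  intro l
  induction l with
  | nil =>
    intro cs h d bo b ret _ _
    cases cs with
    | nil => simp
    | cons c cs' => simp at h
  | cons i l' ih =>
    intro cs h d bo b ret hd hb
    cases cs with
    | nil => simp at h
    | cons c cs' =>
      simp only [List.map_cons, List.cons.injEq] at h
      obtain ⟨h1, h2⟩ := h
      have h1' : PySem.List.pyGet? quote.toList i = some c := h1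
      simp only [List.foldl_cons]
      by_cases hdpos : 0 < d
      · have hbo : bo = some b := hb hdpos
        by_cases hc : c = b
        · have hB : vqStepB quote (d, bo, ret) i = (d + 1, bo, ret ++ "[") := by
            have : ¬ d = 0 := by omega
            simp [vqStepB, h1', hbo, hc, this]
          have hC : vqStepChar (d, b, ret) c = (d + 1, b, ret ++ "[") := by
            have : ¬ d = 0 := by omega
            simp [vqStepChar, hc, this]
          rw [hB, hC]
          exact ih cs' h2 (d + 1) bo b (ret ++ "[") (by omega) (fun _ => hbo)
        · have hB : vqStepB quote (d, bo, ret) i = (d - 1, bo, ret ++ "]") := by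
            simp [vqStepB, h1', hbo, hdpos, hc]
          have hC : vqStepChar (d, b, ret) c = (d - 1, b, ret ++ "]") := by
            simp [vqStepChar, hdpos, hc]
          rw [hB, hC]
          exact ih cs' h2 (d - 1) bo b (ret ++ "]") (by omega) (fun h' => hbo)
      · have hd0 : d = 0 := by omega
        have hB : vqStepB quote (d, bo, ret) i = (1, some c, ret ++ "[") := by
          simp [vqStepB, hd0, h1']
        have hC : vqStepChar (d, b, ret) c = (1, c, ret ++ "[") := by
          simp [vqStepChar, hd0]
        rw [hB, hC]
        exact ih cs' h2 1 (some c) c (ret ++ "[") (by omega) (fun _ => rfl)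

-- the even-index positions, read through getElem?, are exactly everySecond
theorem vq_core : ∀ (xs : List Char),
    (List.range ((xs.length + 1) / 2)).map (fun k => xs[2 * k]?) = (everySecond xs).map some := by
  intro xs
  induction xs using everySecond.induct with
  | case1 => simp [everySecond]
  | case2 a => simp [everySecond]
  | case3 a b t ih =>
    have hcnt : ((a :: b :: t).length + 1) / 2 = (t.length + 1) / 2 + 1 := by
      simp only [List.length_cons]; omega
    rw [hcnt, List.range_succ_eq_map]
    simp only [List.map_cons, List.map_map, everySecond]
    refine congrArg₂ List.cons (by simp) ?_
    rw [← ih]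
    refine List.map_congr_left (fun k _ => ?_)
    have h2 : 2 * (k + 1) = 2 * k + 1 + 1 := by ring
    simp [Function.comp, h2]

-- A's pyRange of even indices reads off everySecond
theorem vq_ES (xs : List Char) :
    (PySem.List.pyRange 0 (xs.length : Int) 2).map (fun i => PySem.List.pyGet? xs i)
      = (everySecond xs).map some := by
  rw [PySem.List.pyRange_of_pos _ _ (by norm_num)]
  rcases Nat.eq_zero_or_pos xs.length with h0 | hpos
  · rw [List.length_eq_zero_iff] at h0
    subst h0
    simp [everySecond]
  · rw [if_pos (by exact_mod_cast hpos)]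
    have hcnt : (((xs.length : Int) - 0 + 2 - 1) / 2).toNat = (xs.length + 1) / 2 := by omega
    rw [hcnt, ← vq_core xs]
    simp only [List.map_map]
    refine List.map_congr_left (fun k _ => ?_)
    have hcast : (0 : Int) + 2 * (k : Int) = ((2 * k : Nat) : Int) := by push_cast; ring
    simp only [Function.comp_apply, hcast, PySem.List.pyGet?_natCast]

-- a filterMap whose values are all `some` is the underlying map
theorem vq_filterMap_some {α β : Type} (g : α → Option β) :
    ∀ (l : List α) (ys : List β), l.map g = ys.map some → l.filterMap g = ys := by
  intro l
  induction l with
  | nil => intro ys h; cases ys <;> simp_all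
  | cons x l' ih =>
    intro ys h
    cases ys with
    | nil => simp at h
    | cons y ys' =>
      simp only [List.map_cons, List.cons.injEq] at h
      simp [h.1, ih ys' h.2]

-- B's quote[::2] is everySecond
theorem vq_SL (xs : List Char) : PySem.List.slice? xs none none 2 = some (everySecond xs) := by
  have hsi : PySem.List.sliceIndices xs.length none none 2 = (0, (xs.length : Int), 2) := by
    simp [PySem.List.sliceIndices]
  rw [PySem.List.slice?, if_neg (by norm_num), hsi]
  refine congrArg some (vq_filterMap_some _ _ _ ?_)
  rcases Nat.eq_zero_or_pos xs.length with h0 | hpos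
  · rw [List.length_eq_zero_iff] at h0
    subst h0
    simp [everySecond]
  · rw [if_pos (by norm_num), if_pos (by exact_mod_cast hpos)]
    have hcnt : (((xs.length : Int) - 0 + 2 - 1) / 2).toNat = (xs.length + 1) / 2 := by omega
    rw [hcnt, ← vq_core xs]
    refine List.map_congr_left (fun k _ => ?_)
    have hcast : ((0 : Int) + 2 * (k : Int)).toNat = 2 * k := by omega
    rw [hcast]

-- stage-1 correctness: the run splits off a replicate prefix
theorem vqRun_spec (c : Char) : ∀ l : List Char,
    List.replicate (vqRun c l).1 c ++ (vqRun c l).2 = l := by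
  intro l
  induction l with
  | nil => simp [vqRun]
  | cons d rest ih =>
    by_cases h : d = c
    · subst h; simp [vqRun, List.replicate_succ, ih]
    · simp [vqRun, h]

theorem vqRle_flatten : ∀ l : List Char,
    ((vqRle l).map (fun p => List.replicate p.2 p.1)).flatten = l := by
  intro l
  induction l using vqRle.induct with
  | case1 => simp [vqRle]
  | case2 c rest ih =>
    rw [vqRle]
    simp only [List.map_cons, List.flatten_cons, ih]
    rw [List.replicate_succ]
    simpa using vqRun_spec c rest

theorem vqRle_pos : ∀ (l : List Char) (p : Char × Nat), p ∈ vqRle l → 1 ≤ p.2 := by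
  intro l
  induction l using vqRle.induct with
  | case1 => simp [vqRle]
  | case2 c rest ih =>
    intro p hp
    rw [vqRle] at hp
    rcases List.mem_cons.mp hp with h | h
    · subst h; simp
    · exact ih p h

-- string bookkeeping
theorem vq_rep_succ (c : Char) (m : Nat) :
    String.ofList (List.replicate (m + 1) c) = String.ofList [c] ++ String.ofList (List.replicate m c) := by
  rw [List.replicate_succ, ← List.singleton_append, ← String.ofList_append]

theorem vq_join_one (ps : List String) (x : String) :
    String.join (ps ++ [x]) = String.join ps ++ x := by
  simp [String.join]

theorem vq_join_two (ps : List String) (x y : String) :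
    String.join (ps ++ [x, y]) = String.join ps ++ x ++ y := by
  simp [String.join, String.append_assoc]

-- bulk push: a run equal to the base only opens brackets
theorem vq_Lpush (c : Char) : ∀ (m : Nat) (d : Int) (ret : String),
    (List.replicate m c).foldl vqStepChar (d, c, ret)
      = (d + (m : Int), c, ret ++ String.ofList (List.replicate m '[')) := by
  intro m
  induction m with
  | zero => intro d ret; simp
  | succ m ih =>
    intro d ret
    rw [List.replicate_succ, List.foldl_cons]
    have hstep : vqStepChar (d, c, ret) c = (d + 1, c, ret ++ "[") := by
      simp [vqStepChar]
    rw [hstep, ih]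
    simp only [Prod.mk.injEq]
    refine ⟨by omega, trivial, ?_⟩
    rw [vq_rep_succ, ← String.append_assoc]

-- bulk pop: a run differing from the base, no longer than the depth, only closes brackets
theorem vq_Lpop (c b : Char) (hc : c ≠ b) : ∀ (m : Nat) (d : Int) (ret : String),
    (m : Int) ≤ d →
    (List.replicate m c).foldl vqStepChar (d, b, ret)
      = (d - (m : Int), b, ret ++ String.ofList (List.replicate m ']')) := by
  intro m
  induction m with
  | zero => intro d ret _; simp
  | succ m ih =>
    intro d ret hm
    rw [List.replicate_succ, List.foldl_cons]
    have hstep : vqStepChar (d, b, ret) c = (d - 1, b, ret ++ "]") := by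
      have : 0 < d := by omega
      simp [vqStepChar, this, hc]
    rw [hstep, ih _ _ (by omega)]
    simp only [Prod.mk.injEq]
    refine ⟨by omega, trivial, ?_⟩
    rw [vq_rep_succ, ← String.append_assoc]

-- one run of stage 2 is exactly what the character loop does on the replicate block
theorem vq_oneRun (c : Char) (m : Nat) (hm : 1 ≤ m) (d : Int) (b : Char) (parts : List String)
    (hd : 0 ≤ d) :
    (List.replicate m c).foldl vqStepChar (d, b, String.join parts)
      = ((vqStepRun (d, b, parts) (c, m)).1, (vqStepRun (d, b, parts) (c, m)).2.1,
          String.join (vqStepRun (d, b, parts) (c, m)).2.2)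
    ∧ 0 ≤ (vqStepRun (d, b, parts) (c, m)).1 := by
  by_cases hd0 : d = 0
  · -- depth 0: the whole run opens
    subst hd0
    have hRun : vqStepRun (0, b, parts) (c, m)
        = ((m : Int), c, parts ++ [String.ofList (List.replicate m '[')]) := by
      simp [vqStepRun]
    rw [hRun]
    obtain ⟨m', rfl⟩ : ∃ m', m = m' + 1 := ⟨m - 1, by omega⟩
    have hstep : vqStepChar (0, b, String.join parts) c = (1, c, String.join parts ++ "[") := by
      simp [vqStepChar]
    rw [List.replicate_succ, List.foldl_cons, hstep, vq_Lpush]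
    refine ⟨?_, by positivity⟩
    simp only [Prod.mk.injEq]
    refine ⟨by omega, trivial, ?_⟩
    rw [vq_join_one, vq_rep_succ, ← String.append_assoc]
  · by_cases hcb : c = b
    · -- same base: the whole run opens
      subst hcb
      have hRun : vqStepRun (d, c, parts) (c, m)
          = (d + (m : Int), c, parts ++ [String.ofList (List.replicate m '[')]) := by
        simp [vqStepRun, hd0]
      rw [hRun, vq_Lpush]
      exact ⟨by rw [vq_join_one], by omega⟩
    · by_cases hmd : (m : Int) ≤ d
      · -- run fits: it only closes
        have hk : min (m : Int) d = (m : Int) := by omega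
        have htn : ((m : Int)).toNat = m := by omega
        have hRun : vqStepRun (d, b, parts) (c, m)
            = (d - (m : Int), b, parts ++ [String.ofList (List.replicate m ']')]) := by
          simp [vqStepRun, hd0, hcb, hk, htn]
        rw [hRun, vq_Lpop c b hcb m d _ hmd]
        exact ⟨by rw [vq_join_one], by omega⟩
      · -- run closes the whole block then reopens with the new base
        have hk : min (m : Int) d = d := by omega
        have hr : (m : Int) - d ≠ 0 := by omega
        have hrn : ((m : Int) - d).toNat = m - d.toNat := by omega
        have hRun : vqStepRun (d, b, parts) (c, m)
            = ((m : Int) - d, c, parts ++ [String.ofList (List.replicate d.toNat ']'),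
                String.ofList (List.replicate (m - d.toNat) '[')]) := by
          simp only [vqStepRun, if_neg hd0, if_neg hcb, hk, hrn]
          rw [if_pos hr]
        rw [hRun]
        dsimp only
        have hsplit : List.replicate m c
            = List.replicate d.toNat c ++ (c :: List.replicate (m - d.toNat - 1) c) := by
          have h : m = d.toNat + (1 + (m - d.toNat - 1)) := by omega
          rw [h, List.replicate_add, List.replicate_add, List.replicate_one]
          simp
        rw [hsplit, List.foldl_append, vq_Lpop c b hcb d.toNat d _ (by omega)]
        have hz : d - (d.toNat : Int) = 0 := by omega
        rw [hz, List.foldl_cons]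
        have hstep : vqStepChar (0, b, String.join parts ++ String.ofList (List.replicate d.toNat ']')) c
            = (1, c, String.join parts ++ String.ofList (List.replicate d.toNat ']') ++ "[") := by
          simp [vqStepChar]
        rw [hstep, vq_Lpush]
        refine ⟨?_, by omega⟩
        simp only [Prod.mk.injEq]
        refine ⟨by omega, trivial, ?_⟩
        rw [vq_join_two]
        have hm1 : m - d.toNat = (m - d.toNat - 1) + 1 := by omega
        rw [hm1, vq_rep_succ, ← String.append_assoc]
        rfl

-- stage 2 over the run list equals the character loop over the flattened characters
theorem vq_runFold : ∀ (runs : List (Char × Nat)), (∀ p ∈ runs, 1 ≤ p.2) →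
    ∀ (d : Int) (b : Char) (parts : List String), 0 ≤ d →
    (((runs.map (fun p => List.replicate p.2 p.1)).flatten).foldl vqStepChar (d, b, String.join parts)
      = ((runs.foldl vqStepRun (d, b, parts)).1, (runs.foldl vqStepRun (d, b, parts)).2.1,
          String.join (runs.foldl vqStepRun (d, b, parts)).2.2)) := by
  intro runs
  induction runs with
  | nil => intro _ d b parts _; simp
  | cons p rest ih =>
    intro hpos d b parts hd
    obtain ⟨c, m⟩ := p
    have hm : 1 ≤ m := hpos (c, m) (by simp)
    simp only [List.map_cons, List.flatten_cons, List.foldl_append, List.foldl_cons]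
    obtain ⟨h1, h2⟩ := vq_oneRun c m hm d b parts hd
    rw [h1]
    have := ih (fun q hq => hpos q (List.mem_cons_of_mem _ hq))
      (vqStepRun (d, b, parts) (c, m)).1 (vqStepRun (d, b, parts) (c, m)).2.1
      (vqStepRun (d, b, parts) (c, m)).2.2 h2
    simpa using this

-- ===== VERDICT (by name: the statement is the Claim_ definition above) =====
theorem valid_quote_spec : Claim_equal_valid_quote := by
  intro quote _
  unfold Spec_valid_quote valid_quote valid_quote_alt
  by_cases hc : PySem.Str.count quote "<<" ≠ PySem.Str.count quote ">>"
  · rw [if_pos hc, if_pos hc]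
  · rw [if_neg hc, if_neg hc]
    dsimp only
    have hmap : (PySem.List.pyRange 0 (PySem.Str.len quote) 2).map (fun i => PySem.Str.pyGet? quote i)
        = (everySecond quote.toList).map some := by
      simpa [PySem.Str.pyGet?, PySem.Chars.pyGet?, PySem.Str.len] using vq_ES quote.toList
    obtain ⟨hA1, hA2⟩ := vq_loop quote (PySem.List.pyRange 0 (PySem.Str.len quote) 2) [] "" 0 none
      (by simp) (by simp)
    obtain ⟨hB1, hB2⟩ := vq_foldBC quote (PySem.List.pyRange 0 (PySem.Str.len quote) 2)
      (everySecond quote.toList) hmap 0 none ' ' "" (le_refl 0) (by omega)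
    have hseq : ((PySem.Str.slice? quote none none 2).getD "").toList = everySecond quote.toList := by
      rw [PySem.Str.slice?]
      rw [show PySem.Chars.slice? quote.toList none none 2
            = PySem.List.slice? quote.toList none none 2 from rfl]
      rw [vq_SL]
      simp
    rw [hseq]
    have hRF := vq_runFold (vqRle (everySecond quote.toList)) (vqRle_pos _) 0 ' ' [] (le_refl 0)
    rw [vqRle_flatten] at hRF
    rw [show String.join [] = "" from rfl] at hRF
    have hC1 : ((everySecond quote.toList).foldl vqStepChar (0, ' ', "")).1
        = ((vqRle (everySecond quote.toList)).foldl vqStepRun (0, ' ', [])).1 := by rw [hRF]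
    have hC2 : ((everySecond quote.toList).foldl vqStepChar (0, ' ', "")).2.2
        = String.join ((vqRle (everySecond quote.toList)).foldl vqStepRun (0, ' ', [])).2.2 := by
      rw [hRF]
    have k1 : ((((PySem.List.pyRange 0 (PySem.Str.len quote) 2).foldl (vqStepA quote) ([], "")).1.length : Nat) : Int)
        = ((vqRle (everySecond quote.toList)).foldl vqStepRun (0, ' ', [])).1 := by
      rw [← hA1, hB1, hC1]
    have k2 : ((PySem.List.pyRange 0 (PySem.Str.len quote) 2).foldl (vqStepA quote) ([], "")).2
        = String.join ((vqRle (everySecond quote.toList)).foldl vqStepRun (0, ' ', [])).2.2 := by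
      rw [← hA2, hB2, hC2]
    by_cases hs : ((PySem.List.pyRange 0 (PySem.Str.len quote) 2).foldl (vqStepA quote) ([], "")).1 = []
    · have hz : ((vqRle (everySecond quote.toList)).foldl vqStepRun (0, ' ', [])).1 = 0 := by
        rw [← k1, hs]
        simp
      rw [if_neg (by simpa using hs), if_neg (by simpa using hz)]
      exact k2
    · have hz : ((vqRle (everySecond quote.toList)).foldl vqStepRun (0, ' ', [])).1 ≠ 0 := by
        rw [← k1]
        simpa using hs
      rw [if_pos hs, if_pos hz]
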